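-- pv_equiv track=rewrite | github.com/helgefmi/aoc2019 | day04/part2.py | meets_criteria
-- ===== SOURCE A (Python) =====
-- from collections import defaultdict
-- from typing import Iterable, Dict
--
-- def meets_criteria(n: int) -> bool:
--     digits = list(map(int, str(n)))
--     zipped = list(zip(digits, digits[1:]))
--
--     if not all(nex >= cur for cur, nex in zipped):
--         return False
--
--     num_of_value: Dict[int, int] = defaultdict(int)
--     for cur in digits:
--         num_of_value[cur] += 1
--
--     for count in num_of_value.values():
--         if count == 2:
--             return True
--
--     return False
-- ===== SOURCE B (Python) =====
-- from itertools import groupby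
--
-- def meets_criteria(n: int) -> bool:
--     digits = list(map(int, str(n)))
--     if digits != sorted(digits):
--         return False
--     return any(sum(1 for _ in g) == 2 for _, g in groupby(digits))
-- ===== Notes on version B (the rewrite author's own statement) =====
-- stated objective: idiomatic
-- what changed: Replaces the zip-pairwise monotonicity scan and defaultdict frequency table with a digits == sorted(digits) comparison plus itertools.groupby run lengths, checking for a consecutive run of exactly two.
import Mathlib
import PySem

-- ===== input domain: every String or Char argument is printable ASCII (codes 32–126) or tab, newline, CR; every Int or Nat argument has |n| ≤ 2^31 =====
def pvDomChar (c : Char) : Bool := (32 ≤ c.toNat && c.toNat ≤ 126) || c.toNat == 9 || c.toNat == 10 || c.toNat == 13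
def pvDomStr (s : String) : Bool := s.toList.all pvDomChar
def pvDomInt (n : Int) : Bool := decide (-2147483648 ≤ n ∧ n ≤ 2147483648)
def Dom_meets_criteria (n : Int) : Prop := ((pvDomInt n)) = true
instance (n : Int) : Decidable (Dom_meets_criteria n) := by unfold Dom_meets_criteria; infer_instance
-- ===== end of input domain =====

-- B replaces A's zip-pairwise scan + defaultdict frequency table by `digits == sorted(digits)`
-- plus groupby run lengths (any consecutive run of exactly two); idiomatic, not claimed faster.

-- ===== PORT A =====
-- digits = list(map(int, str(n))): on Pre_ (0 ≤ n) every character of str(n) is a decimal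
-- digit, and int(c) for a single digit character is its code minus 48 (exact there).
def pyDigits (n : Int) : List Int :=
  (PySem.Int.toChars n).map (fun c => ((c.toNat : Int) - 48))

def meets_criteria (n : Int) : Bool :=
  let digits := pyDigits n
  let zipped := digits.zip (digits.drop 1)      -- zip(digits, digits[1:])
  if !(zipped.all (fun p => decide (p.1 ≤ p.2))) then false
  else
    -- num_of_value = defaultdict(int); for cur in digits: num_of_value[cur] += 1
    let num_of_value : PySem.Dict Int Int :=
      digits.foldl (fun d cur => d.modify cur 0 (· + 1)) PySem.Dict.empty
    -- for count in num_of_value.values(): if count == 2: return True / return False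
    num_of_value.values.any (fun count => count == 2)

-- ===== PORT B =====
-- itertools.groupby(digits): the lengths of the maximal runs of equal consecutive elements
def runLengths : List Int → List Nat
  | [] => []
  | x :: xs =>
      ((xs.takeWhile (fun y => y == x)).length + 1)
        :: runLengths (xs.dropWhile (fun y => y == x))
  termination_by ds => ds.length
  decreasing_by simp [List.length_dropWhile_le]

def meets_criteria_alt (n : Int) : Bool :=
  let digits := pyDigits n
  if !(digits == PySem.List.sorted digits (fun x => x) false) then false
  else (runLengths digits).any (fun l => l == 2)

-- ===== PRECONDITION & SPEC =====
-- Pre_ excludes negative inputs, where str(n) starts with a sign character and the int() conversion raises ValueError in A (and in B).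
def Pre_meets_criteria (n : Int) : Prop := 0 ≤ n
instance (n : Int) : Decidable (Pre_meets_criteria n) := by unfold Pre_meets_criteria; infer_instance
def pvWitness_meets_criteria : Int := (122345)

def Spec_meets_criteria (n : Int) (out : Bool) : Prop := out = meets_criteria_alt n
instance (n : Int) (out : Bool) : Decidable (Spec_meets_criteria n out) := by unfold Spec_meets_criteria; infer_instance

-- ===== CLAIM (what is proved, stated in full; the proofs are below) =====
def Claim_equal_meets_criteria : Prop := ∀ (n : Int), Dom_meets_criteria n → Pre_meets_criteria n → Spec_meets_criteria n (meets_criteria n)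

-- ===== LEMMAS AND PROOFS =====

-- A's zip-with-tail all-≤ test decides that the list is a ≤-chain
theorem zipall_eq_chain (ds : List Int) :
    ((ds.zip (ds.drop 1)).all (fun p => decide (p.1 ≤ p.2)) = true) ↔ List.IsChain (· ≤ ·) ds := by
  induction ds with
  | nil => simp
  | cons a rest ih =>
    cases rest with
    | nil => simp
    | cons b r =>
      simp only [List.drop_succ_cons, List.drop_zero, List.zip_cons_cons, List.all_cons] at *
      rw [Bool.and_eq_true, ih, List.isChain_cons_cons]
      simp

-- the two guards agree: adjacent-nondecreasing = "digits equal their sort"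
theorem cond_iff (ds : List Int) :
    ((ds.zip (ds.drop 1)).all (fun p => decide (p.1 ≤ p.2)))
      = (ds == PySem.List.sorted ds (fun x => x) false) := by
  rw [Bool.eq_iff_iff, zipall_eq_chain, beq_iff_eq]
  constructor
  · intro h
    exact (PySem.List.sorted_eq_self_of_pairwise ds (fun x => x) h.pairwise).symm
  · intro h
    apply List.isChain_iff_pairwise.mpr
    have h2 := PySem.List.sorted_pairwise ds (fun x => x)
    rw [← h] at h2
    exact h2

-- in a ≤-sorted list, the head's value never reappears after its initial run
theorem not_mem_dropWhile (x : Int) (xs : List Int) (h : xs.Pairwise (· ≤ ·))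
    (hle : ∀ y ∈ xs, x ≤ y) : x ∉ xs.dropWhile (fun y => y == x) := by
  induction xs with
  | nil => simp
  | cons y ys ih =>
    rw [List.pairwise_cons] at h
    by_cases hy : y = x
    · subst hy
      rw [List.dropWhile_cons_of_pos (by simp)]
      exact ih h.2 (fun z hz => hle z (List.mem_cons_of_mem _ hz))
    · rw [List.dropWhile_cons_of_neg (by simp [hy])]
      intro hmem
      rcases List.mem_cons.mp hmem with h1 | h2
      · exact hy h1.symm
      · have hxy : x < y := lt_of_le_of_ne (hle y (List.mem_cons_self)) (fun e => hy e.symm)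
        exact absurd (h.1 x h2) (not_le.mpr hxy)

-- on a ≤-sorted list, "some value occurs exactly twice" = "some run has length two"
theorem runs_counts (ds : List Int) (h : ds.Pairwise (· ≤ ·)) :
    (ds.any (fun k => ((ds.count k : Int) == 2))) = (runLengths ds).any (fun l => l == 2) := by
  induction ds using runLengths.induct with
  | case1 => simp [runLengths]
  | case2 x xs ih =>
    set t := xs.takeWhile (fun y => y == x) with ht
    set d := xs.dropWhile (fun y => y == x) with hd
    have hsplit : xs = t ++ d := (List.takeWhile_append_dropWhile).symm
    rw [List.pairwise_cons] at h
    have hpd : d.Pairwise (· ≤ ·) := h.2.sublist (List.dropWhile_sublist _)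
    have hxd : x ∉ d := not_mem_dropWhile x xs h.2 h.1
    have htx : ∀ y ∈ t, y = x := fun y hy => by
      have := List.mem_takeWhile_imp hy; simpa using this
    have hct : t.count x = t.length := List.count_eq_length.mpr (fun b hb => (htx b hb).symm)
    have hcx : (x :: xs).count x = t.length + 1 := by
      rw [List.count_cons_self, hsplit, List.count_append, hct, List.count_eq_zero.mpr hxd]
    have hck : ∀ k ∈ d, (x :: xs).count k = d.count k := by
      intro k hk
      have hkx : k ≠ x := fun e => hxd (e ▸ hk)
      rw [hsplit]
      simp [List.count_append, Ne.symm hkx,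
        List.count_eq_zero.mpr (fun hkt => hkx (htx k hkt))]
    rw [runLengths]
    simp only [← ht, ← hd]
    conv_rhs => rw [List.any_cons]
    rw [← ih hpd, Bool.eq_iff_iff]
    simp only [List.any_eq_true, Bool.or_eq_true, beq_iff_eq]
    constructor
    · rintro ⟨k, hk, h2⟩
      rcases List.mem_cons.mp hk with rfl | hk2
      · left; rw [hcx] at h2; exact_mod_cast h2
      · rw [hsplit] at hk2
        rcases List.mem_append.mp hk2 with hkt | hkd
        · left; rw [htx k hkt, hcx] at h2; exact_mod_cast h2
        · right; exact ⟨k, hkd, by rw [← hck k hkd]; exact h2⟩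
    · rintro (h1 | ⟨k, hk, h2⟩)
      · exact ⟨x, List.mem_cons_self, by rw [hcx]; exact_mod_cast h1⟩
      · exact ⟨k, List.mem_cons_of_mem _ (by rw [hsplit]; exact List.mem_append.mpr (Or.inr hk)),
          by rw [hck k hk]; exact h2⟩

-- A's counting loop is Counter(digits); its values-scan is the dedup'd per-value count test
theorem values_any_eq (ds : List Int) :
    ((ds.foldl (fun d cur => d.modify cur 0 (· + 1)) PySem.Dict.empty :
        PySem.Dict Int Int).values.any (fun count => count == 2))
      = (ds.any (fun k => ((ds.count k : Int) == 2))) := by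
  rw [← PySem.Dict.counter_eq_foldl]
  rw [show (PySem.Dict.counter ds).values
        = (PySem.Dict.counter ds).items.map (·.2) from rfl]
  rw [PySem.Dict.items_counter]
  rw [Bool.eq_iff_iff]
  simp only [List.map_map, List.any_map, List.any_eq_true, Function.comp]
  constructor
  · rintro ⟨k, hk, h2⟩
    exact ⟨k, (PySem.Set.mem_ofList ds k).mp hk, h2⟩
  · rintro ⟨k, hk, h2⟩
    exact ⟨k, (PySem.Set.mem_ofList ds k).mpr hk, h2⟩

theorem bodies_eq (ds : List Int) :
    (if !((ds.zip (ds.drop 1)).all (fun p => decide (p.1 ≤ p.2))) then false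
     else ((ds.foldl (fun d cur => d.modify cur 0 (· + 1)) PySem.Dict.empty :
        PySem.Dict Int Int).values.any (fun count => count == 2)))
    = (if !(ds == PySem.List.sorted ds (fun x => x) false) then false
       else (runLengths ds).any (fun l => l == 2)) := by
  rw [cond_iff]
  by_cases hc : (ds == PySem.List.sorted ds (fun x => x) false) = true
  · rw [hc]
    simp only [Bool.not_true, Bool.false_eq_true, if_false]
    rw [values_any_eq, runs_counts]
    have h2 := PySem.List.sorted_pairwise ds (fun x => x)
    rw [← beq_iff_eq.mp hc] at h2
    exact h2
  · rw [Bool.not_eq_true] at hc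
    rw [hc]
    simp

-- ===== VERDICT (by name: the statement is the Claim_ definition above) =====
theorem meets_criteria_spec : Claim_equal_meets_criteria := by
  intro n _ _
  show meets_criteria n = meets_criteria_alt n
  exact bodies_eq (pyDigits n)
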